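-- pv_equiv track=rewrite | github.com/AmDumDee/rossetacode | python/Cousin_primes.py | spacedTable
-- ===== SOURCE A (Python) =====
-- def listTranspose(xss):
--
--     def go(xss):
--         if xss:
--             h, *t = xss
--             return (
--                 [[h[0]] + [xs[0] for xs in t if xs]] + (
--                     go([h[1:]] + [xs[1:] for xs in t])
--                 )
--             ) if h and isinstance(h, list) else go(t)
--         else:
--             return []
--     return go(xss)
--
-- def spacedTable(rows):
--
--     columnWidths = [
--         len(str(row[-1])) for row in listTranspose(rows)
--     ]
--     return '\n'.join([
--         ' '.join(
--             map(
--                 lambda w, s: s.rjust(w, ' '),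
--                 columnWidths, row
--             )
--         ) for row in rows
--     ])
-- ===== SOURCE B (Python) =====
-- def spacedTable(rows):
--     ncols = max(map(len, rows), default=0)
--
--     def width(k):
--         # last row that has a column k determines its width
--         return next(len(row[k]) for row in reversed(rows) if len(row) > k)
--
--     widths = [width(k) for k in range(ncols)]
--     return '\n'.join(
--         ' '.join(s.rjust(w) for w, s in zip(widths, row)) for row in rows
--     )
-- ===== Notes on version B (the rewrite author's own statement) =====
-- stated objective: faster
-- what changed: Replaced the recursive list transpose (which repeatedly slices every row per emitted column) by a direct per-column width lookup: the width of column k is the length of the entry in the last row that reaches column k, found by scanning the reversed row list.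
import Mathlib
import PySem

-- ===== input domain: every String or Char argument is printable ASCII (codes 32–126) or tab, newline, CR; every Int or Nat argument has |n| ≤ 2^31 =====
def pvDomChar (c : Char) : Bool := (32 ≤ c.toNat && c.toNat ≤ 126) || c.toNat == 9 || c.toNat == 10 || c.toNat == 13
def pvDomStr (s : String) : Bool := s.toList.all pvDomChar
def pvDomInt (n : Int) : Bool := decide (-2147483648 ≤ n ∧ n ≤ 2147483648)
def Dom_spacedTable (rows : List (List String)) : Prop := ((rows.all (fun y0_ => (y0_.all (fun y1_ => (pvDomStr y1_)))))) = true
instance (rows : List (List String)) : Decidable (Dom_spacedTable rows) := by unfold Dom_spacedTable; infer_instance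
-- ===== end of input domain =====

-- B replaces A's quadratic recursive transpose by reading each column width directly
-- from the last row that reaches that column (objective: faster).

-- s.rjust(w, ' ') — exact: pad on the left with spaces up to width w (no-op if w ≤ len(s))
def pyRjust (s : String) (w : Int) : String :=
  String.ofList (List.replicate (w - PySem.Str.len s).toNat ' ' ++ s.toList)

-- ===== PORT A =====
-- listTranspose's inner 'go' (all inputs here are lists, so 'isinstance(h, list)' is True)
def pvGoT : List (List String) → List (List String)
  | [] => []
  | h :: t =>
    match h with
    | [] => pvGoT t
    | x :: hr => (x :: t.filterMap List.head?) :: pvGoT (hr :: t.map List.tail)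
termination_by xss => ((xss.map List.length).sum) * 2 + xss.length
decreasing_by
  · simp only [List.map_cons, List.sum_cons, List.length_cons, List.length_nil]
    omega
  · have h : ((t.map (fun r => r.length - 1)).sum) ≤ ((t.map List.length).sum) :=
      List.sum_le_sum (fun r _ => by omega)
    simp only [List.map_cons, List.sum_cons, List.length_cons, List.map_map,
      List.map_attach_eq_pmap, List.pmap_eq_map, Function.comp_def, List.length_tail,
      List.length_map]
    omega

def spacedTable (rows : List (List String)) : String :=
  -- len(str(row[-1])): the rows of 'go's output are never empty, so row[-1] never raises;
  -- .getD "" covers the unreachable none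
  let columnWidths := (pvGoT rows).map
    (fun col => PySem.Str.len ((PySem.List.pyGet? col (-1)).getD ""))
  PySem.Str.join "\n" (rows.map (fun row =>
    PySem.Str.join " " (List.zipWith (fun w s => pyRjust s w) columnWidths row)))

-- ===== PORT B =====
def spacedTable_alt (rows : List (List String)) : String :=
  let ncols := rows.foldl (fun a r => max a (PySem.List.len r)) 0
  -- next(len(row[k]) for row in reversed(rows) if len(row) > k); for k < ncols some row
  -- always qualifies, so the generator never exhausts (the 0 branch is unreachable)
  let width := fun (k : Int) =>
    match rows.reverse.find? (fun r => decide (k < PySem.List.len r)) with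
    | some r => PySem.Str.len ((PySem.List.pyGet? r k).getD "")
    | none => 0
  let widths := (PySem.List.pyRange 0 ncols 1).map width
  PySem.Str.join "\n" (rows.map (fun row =>
    PySem.Str.join " " ((widths.zip row).map (fun p => pyRjust p.2 p.1))))

-- ===== PRECONDITION & SPEC =====
def Spec_spacedTable (rows : List (List String)) (out : String) : Prop := out = spacedTable_alt rows
instance (rows : List (List String)) (out : String) : Decidable (Spec_spacedTable rows out) := by unfold Spec_spacedTable; infer_instance

-- ===== CLAIM (what is proved, stated in full; the proofs are below) =====
def Claim_equal_spacedTable : Prop := ∀ (rows : List (List String)), Dom_spacedTable rows → Spec_spacedTable rows (spacedTable rows)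

-- ===== LEMMAS AND PROOFS =====

-- the longest row length
def pvMaxLen (xss : List (List String)) : Nat :=
  xss.foldr (fun r m => max r.length m) 0

-- the k-th column of the transpose
def pvCol (xss : List (List String)) (k : Nat) : List String :=
  xss.filterMap (fun r => r[k]?)

theorem pvMaxLen_tail (t : List (List String)) :
    pvMaxLen (t.map List.tail) = pvMaxLen t - 1 := by
  induction t with
  | nil => rfl
  | cons r t ih =>
    simp only [pvMaxLen, List.map_cons, List.foldr_cons] at *
    rw [ih, List.length_tail]
    omega

theorem pvGoT_eq (xss : List (List String)) :
    pvGoT xss = (List.range (pvMaxLen xss)).map (pvCol xss) := by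
  induction xss using pvGoT.induct with
  | case1 => simp [pvGoT, pvMaxLen]
  | case2 t ih =>
    rw [pvGoT, ih]
    have h1 : pvMaxLen ([] :: t) = pvMaxLen t := by simp [pvMaxLen]
    have h2 : pvCol (([] : List String) :: t) = pvCol t := by
      funext k; simp [pvCol]
    rw [h1, h2]
  | case3 t x hr ih =>
    simp only [List.map_attach_eq_pmap, List.pmap_eq_map] at ih
    rw [pvGoT, ih]
    have h1 : pvMaxLen ((x :: hr) :: t) = pvMaxLen (hr :: t.map List.tail) + 1 := by
      have := pvMaxLen_tail t
      simp only [pvMaxLen, List.foldr_cons, List.length_cons] at *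
      omega
    rw [h1, List.range_succ_eq_map, List.map_cons, List.map_map]
    congr 1
    · simp only [pvCol, List.filterMap_cons, List.getElem?_cons_zero]
      congr 1
      exact List.filterMap_congr (fun r _ => by cases r <;> simp)
    · apply List.map_congr_left
      intro k _
      have hfm : List.filterMap (fun x : List String => x.tail[k]?) t
          = List.filterMap (fun r : List String => r[k.succ]?) t :=
        List.filterMap_congr (fun r _ => by simp [List.getElem?_tail])
      simp only [Function.comp_apply, pvCol, List.filterMap_cons,
        List.getElem?_cons_succ, List.filterMap_map, hfm]

theorem pvNcols_eq (xss : List (List String)) :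
    xss.foldl (fun a r => max a (PySem.List.len r)) 0 = (pvMaxLen xss : Int) := by
  suffices h : ∀ (t : List (List String)) (a : Nat),
      t.foldl (fun a r => max a (PySem.List.len r)) (a : Int) = ((pvMaxLen t).max a : Int) by
    simpa using h xss 0
  intro t
  induction t with
  | nil => intro a; simp [pvMaxLen]
  | cons r t ih =>
    intro a
    simp only [List.foldl_cons]
    have : (max (a : Int) (PySem.List.len r)) = ((a.max r.length : Nat) : Int) := by
      simp [PySem.List.len_eq]
    rw [this, ih]
    simp only [pvMaxLen, List.foldr_cons]
    push_cast
    omega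

-- the last element of a column = scan the reversed rows for the first row reaching that column
theorem pvWidth_eq (l : List (List String)) (k : Nat) :
    (match l.find? (fun r => decide ((k : Int) < PySem.List.len r)) with
      | some r => PySem.Str.len ((PySem.List.pyGet? r (k : Int)).getD "")
      | none => 0)
    = PySem.Str.len (((l.filterMap (fun r => r[k]?)).head?).getD "") := by
  induction l with
  | nil => rfl
  | cons r t ih =>
    by_cases h : k < r.length
    · have hg : r[k]? = some r[k] := List.getElem?_eq_getElem h
      rw [List.find?_cons]
      simp [h]
    · have hf : (decide ((k : Int) < PySem.List.len r)) = false := by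
        simp [PySem.List.len_eq]; omega
      have hg : r[k]? = none := List.getElem?_eq_none (by omega)
      rw [List.find?_cons]
      simp only [hf, List.filterMap_cons, hg]
      exact ih

theorem pvWidths_eq (rows : List (List String)) :
    (pvGoT rows).map (fun col => PySem.Str.len ((PySem.List.pyGet? col (-1)).getD ""))
    = (PySem.List.pyRange 0 (rows.foldl (fun a r => max a (PySem.List.len r)) 0) 1).map
        (fun k =>
          match rows.reverse.find? (fun r => decide (k < PySem.List.len r)) with
          | some r => PySem.Str.len ((PySem.List.pyGet? r k).getD "")
          | none => 0) := by
  rw [pvNcols_eq, pvGoT_eq, PySem.List.pyRange_one]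
  simp only [List.map_map]
  have hn : ((pvMaxLen rows : Int) - 0).toNat = pvMaxLen rows := by omega
  rw [hn]
  apply List.map_congr_left
  intro k _
  simp only [Function.comp_apply, zero_add]
  rw [pvWidth_eq rows.reverse k, PySem.List.pyGet?_neg_one]
  have hc : pvCol rows k = (rows.reverse.filterMap (fun r => r[k]?)).reverse := by
    simp [pvCol, List.filterMap_reverse]
  rw [hc, List.getLast?_reverse]

theorem pvZip_eq {α β γ : Type} (f : α → β → γ) (l1 : List α) (l2 : List β) :
    (l1.zip l2).map (fun p => f p.1 p.2) = List.zipWith f l1 l2 := by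
  induction l1 generalizing l2 with
  | nil => simp
  | cons a l1 ih => cases l2 <;> simp [ih]

-- ===== VERDICT (by name: the statement is the Claim_ definition above) =====
theorem spacedTable_spec : Claim_equal_spacedTable := by
  intro rows _
  unfold Spec_spacedTable spacedTable spacedTable_alt
  dsimp only
  rw [pvWidths_eq]
  congr 1
  apply List.map_congr_left
  intro row _
  congr 1
  exact (pvZip_eq _ _ _).symm
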